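-- pv_equiv track=rewrite | github.com/Leapense/problems | 6489번: Call Forwarding/solution.py | resolve_call
-- ===== SOURCE A (Python) =====
-- def resolve_call(start_ext, call_time, forwards):
--     seen = set()
--     current = start_ext
--
--     while True:
--         if current in seen:
--             return "9999"
--
--         seen.add(current)
--
--         rules = forwards.get(current)
--         if not rules:
--             return current
--
--         next_ext = None
--         for (st, ed, tgt) in rules:
--             if st <= call_time <= ed:
--                 next_ext = tgt
--                 break
--
--         if next_ext is None:
--             return current
--
--         current = next_ext
-- ===== SOURCE B (Python) =====
-- def resolve_call(start_ext, call_time, forwards):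
--     # Bounded chase: any forwarding hop leaves from a key of `forwards`, so a
--     # chain that runs len(forwards)+1 hops without stopping must have repeated.
--     current = start_ext
--     for _ in range(len(forwards) + 1):
--         nxt = _forward_target(forwards, call_time, current)
--         if nxt is None:
--             return current
--         current = nxt
--     return "9999"
--
--
-- def _forward_target(forwards, call_time, ext):
--     rules = forwards.get(ext)
--     if not rules:
--         return None
--     for st, ed, tgt in rules:
--         if st <= call_time <= ed:
--             return tgt
--     return None
-- ===== Notes on version B (the rewrite author's own statement) =====
-- stated objective: simpler
-- what changed: Replaces the seen-set cycle detection by a bounded loop of at most len(forwards)+1 hops (any forwarding hop leaves from a dict key, so a longer chain must repeat), returning "9999" when the bound is exhausted.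
import Mathlib
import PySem

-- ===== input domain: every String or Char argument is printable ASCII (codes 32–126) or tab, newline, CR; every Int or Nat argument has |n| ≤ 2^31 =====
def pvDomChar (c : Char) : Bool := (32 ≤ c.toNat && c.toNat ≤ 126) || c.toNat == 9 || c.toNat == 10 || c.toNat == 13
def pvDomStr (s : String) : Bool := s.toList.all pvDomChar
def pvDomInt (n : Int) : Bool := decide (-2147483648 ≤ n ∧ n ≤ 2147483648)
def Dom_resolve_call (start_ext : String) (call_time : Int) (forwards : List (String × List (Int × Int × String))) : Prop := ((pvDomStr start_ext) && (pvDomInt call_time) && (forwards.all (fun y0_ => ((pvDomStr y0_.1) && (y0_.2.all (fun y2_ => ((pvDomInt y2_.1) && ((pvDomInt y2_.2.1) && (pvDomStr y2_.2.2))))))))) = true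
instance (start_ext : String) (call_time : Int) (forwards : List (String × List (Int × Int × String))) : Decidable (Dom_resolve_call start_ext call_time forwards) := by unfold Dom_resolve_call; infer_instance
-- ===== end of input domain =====

-- B replaces A's seen-set cycle detection by a bounded loop of at most len(forwards)+1 hops (simpler; no auxiliary set).


-- ===== PORT A =====
-- for-loop over rules with break (A's inner scan)
def findRuleA (t : Int) : List (Int × Int × String) → Option String
  | [] => none
  | (st, ed, tgt) :: rs => if st ≤ t ∧ t ≤ ed then some tgt else findRuleA t rs

-- A's while-loop; fuel F.length+2 exceeds the loop's possible iteration count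
-- (every non-returning iteration adds a distinct dict key to `seen`), so the
-- fuel-0 guard is unreachable.
def aLoop (t : Int) (F : List (String × List (Int × Int × String))) : Nat → PySem.Set String → String → String
  | 0, _, _ => "9999"
  | f+1, seen, cur =>
    if cur ∈ seen then "9999"
    else
      let seen' := PySem.Set.add seen cur
      match PySem.Dict.get? ⟨F⟩ cur with
      | none => cur
      | some rules =>
        if rules.isEmpty then cur
        else
          match findRuleA t rules with
          | none => cur
          | some nxt => aLoop t F f seen' nxt

def resolve_call (start_ext : String) (call_time : Int) (forwards : List (String × List (Int × Int × String))) : String :=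
  aLoop call_time forwards (forwards.length + 2) PySem.Set.empty start_ext

-- ===== PORT B =====
-- _forward_target from Source B
def findMatch (t : Int) : List (Int × Int × String) → Option String
  | [] => none
  | (st, ed, tgt) :: rs => if st ≤ t ∧ t ≤ ed then some tgt else findMatch t rs

def forwardTarget (F : List (String × List (Int × Int × String))) (t : Int) (ext : String) : Option String :=
  match PySem.Dict.get? ⟨F⟩ ext with
  | none => none
  | some rules => if rules.isEmpty then none else findMatch t rules

-- the for _ in range(len(forwards)+1) loop of Source B
def bLoop (t : Int) (F : List (String × List (Int × Int × String))) : Nat → String → String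
  | 0, _ => "9999"
  | k+1, cur =>
    match forwardTarget F t cur with
    | none => cur
    | some nxt => bLoop t F k nxt

def resolve_call_alt (start_ext : String) (call_time : Int) (forwards : List (String × List (Int × Int × String))) : String :=
  bLoop call_time forwards (forwards.length + 1) start_ext

-- ===== PRECONDITION & SPEC =====
def Spec_resolve_call (start_ext : String) (call_time : Int) (forwards : List (String × List (Int × Int × String))) (out : String) : Prop := out = resolve_call_alt start_ext call_time forwards
instance (start_ext : String) (call_time : Int) (forwards : List (String × List (Int × Int × String))) (out : String) : Decidable (Spec_resolve_call start_ext call_time forwards out) := by unfold Spec_resolve_call; infer_instance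

-- ===== CLAIM (what is proved, stated in full; the proofs are below) =====
def Claim_equal_resolve_call : Prop := ∀ (start_ext : String) (call_time : Int) (forwards : List (String × List (Int × Int × String))), Dom_resolve_call start_ext call_time forwards → Spec_resolve_call start_ext call_time forwards (resolve_call start_ext call_time forwards)

-- ===== LEMMAS AND PROOFS =====

-- the j-th node of the forwarding chain from cur (none once a step was impossible)
def fwd (t : Int) (F : List (String × List (Int × Int × String))) : Nat → String → Option String
  | 0, cur => some cur
  | j+1, cur =>
    match forwardTarget F t cur with
    | none => none
    | some nxt => fwd t F j nxt

theorem findRuleA_eq_findMatch (t : Int) (rs : List (Int × Int × String)) : findRuleA t rs = findMatch t rs := by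
  induction rs with
  | nil => rfl
  | cons p rs ih => obtain ⟨st, ed, tgt⟩ := p; simp [findRuleA, findMatch, ih]

theorem aLoop_step (t : Int) (F : List (String × List (Int × Int × String))) (f : Nat) (seen : PySem.Set String) (cur : String) :
    aLoop t F (f+1) seen cur =
      if cur ∈ seen then "9999"
      else match forwardTarget F t cur with
        | none => cur
        | some nxt => aLoop t F f (PySem.Set.add seen cur) nxt := by
  simp only [aLoop, forwardTarget, findRuleA_eq_findMatch]
  by_cases h : cur ∈ seen
  · simp [h]
  · simp only [h, if_false]
    cases hg : PySem.Dict.get? (⟨F⟩ : PySem.Dict String (List (Int × Int × String))) cur with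
    | none => rfl
    | some rules =>
      by_cases he : rules.isEmpty
      · simp [List.isEmpty_iff.mp he]
      · simp [he]

theorem fwd_add (t : Int) (F : List (String × List (Int × Int × String))) (i : Nat) :
    ∀ (m : Nat) (cur : String), fwd t F (i + m) cur = (fwd t F i cur).bind (fwd t F m) := by
  induction i with
  | zero => intro m cur; simp [fwd]
  | succ i ih =>
    intro m cur
    have : i + 1 + m = (i + m) + 1 := by omega
    rw [this]
    show (match forwardTarget F t cur with
          | none => none
          | some nxt => fwd t F (i + m) nxt) = _
    cases h : forwardTarget F t cur with
    | none => simp [fwd, h]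
    | some nxt => simp [fwd, h, ih]

theorem fwd_some_of_le (t : Int) (F : List (String × List (Int × Int × String))) {j : Nat} {cur c : String}
    (h : fwd t F j cur = some c) {i : Nat} (hij : i ≤ j) : ∃ d, fwd t F i cur = some d := by
  obtain ⟨m, rfl⟩ := Nat.exists_eq_add_of_le hij
  rw [fwd_add] at h
  cases hd : fwd t F i cur with
  | none => rw [hd] at h; simp at h
  | some d => exact ⟨d, rfl⟩

theorem fwd_distinct (t : Int) (F : List (String × List (Int × Int × String))) {j : Nat} {cur c : String}
    (hterm : fwd t F j cur = some c) (hc : forwardTarget F t c = none)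
    {i i' : Nat} (h1 : i < i') (h2 : i' ≤ j) : fwd t F i cur ≠ fwd t F i' cur := by
  intro heq
  obtain ⟨d, hd⟩ := fwd_some_of_le t F hterm h2
  have hi : fwd t F i cur = some d := by rw [heq, hd]
  have h3 : fwd t F (i' + (j - i')) cur = some c := by rw [Nat.add_sub_cancel' h2]; exact hterm
  rw [fwd_add, hd] at h3
  simp only [Option.bind_some] at h3
  have h4 : fwd t F (i + (j - i')) cur = some c := by
    rw [fwd_add, hi]; simpa using h3
  have h5 : fwd t F ((i + (j - i')) + 1) cur = none := by
    rw [fwd_add, h4]; simp [fwd, hc]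
  have hle : (i + (j - i')) + 1 ≤ j := by omega
  obtain ⟨d', hd'⟩ := fwd_some_of_le t F hterm hle
  rw [h5] at hd'; cases hd'

theorem key_of_forwardTarget (t : Int) (F : List (String × List (Int × Int × String))) {cur nxt : String}
    (h : forwardTarget F t cur = some nxt) : cur ∈ F.map Prod.fst := by
  unfold forwardTarget at h
  cases hg : PySem.Dict.get? (⟨F⟩ : PySem.Dict String (List (Int × Int × String))) cur with
  | none => rw [hg] at h; simp at h
  | some rules =>
    simp only [PySem.Dict.get?, Option.map_eq_some_iff] at hg
    obtain ⟨p, hfind, hsnd⟩ := hg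
    have hmem := List.mem_of_find?_eq_some hfind
    have hpred := List.find?_some hfind
    simp only [beq_iff_eq] at hpred
    exact hpred ▸ List.mem_map_of_mem hmem

-- pigeonhole: the chain cannot first reach a terminal exactly after F.length+1 hops
theorem no_term_at_bound (t : Int) (F : List (String × List (Int × Int × String))) {cur c : String}
    (h : fwd t F (F.length + 1) cur = some c) (hc : forwardTarget F t c = none) : False := by
  set n := F.length with hn
  have hinj : Set.InjOn (fun i => fwd t F i cur) ↑(Finset.range (n+1)) := by
    intro a ha b hb hab
    simp only [Finset.coe_range, Set.mem_Iio] at ha hb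
    by_contra hne
    rcases Nat.lt_or_ge a b with hlt | hge
    · exact fwd_distinct t F h hc hlt (by omega) hab
    · have hlt : b < a := by omega
      exact fwd_distinct t F h hc hlt (by omega) hab.symm
  have hcard : ((Finset.range (n+1)).image (fun i => fwd t F i cur)).card = n+1 := by
    rw [Finset.card_image_of_injOn hinj, Finset.card_range]
  have hsub : (Finset.range (n+1)).image (fun i => fwd t F i cur) ⊆ ((F.map Prod.fst).map some).toFinset := by
    intro x hx
    simp only [Finset.mem_image, Finset.mem_range] at hx
    obtain ⟨i, hi, rfl⟩ := hx
    obtain ⟨d, hd⟩ := fwd_some_of_le t F h (show i ≤ n + 1 by omega)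
    obtain ⟨d', hd'⟩ := fwd_some_of_le t F h (show i + 1 ≤ n + 1 by omega)
    have hft : forwardTarget F t d = some d' := by
      rw [fwd_add t F i 1 cur, hd] at hd'
      simp only [Option.bind_some, fwd] at hd'
      cases hft : forwardTarget F t d with
      | none => rw [hft] at hd'; cases hd'
      | some e =>
        rw [hft] at hd'
        simp only [Option.some.injEq] at hd'
        exact congrArg some hd'
    have hkey := key_of_forwardTarget t F hft
    rw [hd]
    simp only [List.mem_toFinset, List.mem_map]
    simpa using hkey
  have hle := Finset.card_le_card hsub
  have hle2 : ((F.map Prod.fst).map some).toFinset.card ≤ n := by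
    calc ((F.map Prod.fst).map some).toFinset.card ≤ ((F.map Prod.fst).map some).length := List.toFinset_card_le _
    _ = n := by simp [hn]
  omega

-- B reaches the terminal c found at hop j < k
theorem bLoop_term (t : Int) (F : List (String × List (Int × Int × String))) :
    ∀ (k j : Nat) (cur c : String), j < k → fwd t F j cur = some c → forwardTarget F t c = none →
      bLoop t F k cur = c := by
  intro k
  induction k with
  | zero => intro j cur c hj; omega
  | succ k ih =>
    intro j cur c hj hfwd hterm
    cases j with
    | zero =>
      simp only [fwd, Option.some.injEq] at hfwd
      subst hfwd
      simp [bLoop, hterm]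
    | succ j' =>
      simp only [fwd] at hfwd
      cases hft : forwardTarget F t cur with
      | none => rw [hft] at hfwd; cases hfwd
      | some nxt =>
        rw [hft] at hfwd
        simp only [bLoop, hft]
        exact ih j' nxt c (by omega) hfwd hterm

-- B returns "9999" when no terminal occurs within k hops
theorem bLoop_cycle (t : Int) (F : List (String × List (Int × Int × String))) :
    ∀ (k : Nat) (cur : String),
      (∀ j c, j < k → fwd t F j cur = some c → forwardTarget F t c ≠ none) →
      bLoop t F k cur = "9999" := by
  intro k
  induction k with
  | zero => intro cur _; rfl
  | succ k ih =>
    intro cur hno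
    cases hft : forwardTarget F t cur with
    | none => exact absurd hft (hno 0 cur (by omega) rfl)
    | some nxt =>
      simp only [bLoop, hft]
      exact ih nxt (fun j c hj hf => hno (j+1) c (by omega) (by simp [fwd, hft, hf]))

-- A reaches the same terminal, provided no chain node up to it is in `seen`
theorem aLoop_term (t : Int) (F : List (String × List (Int × Int × String))) :
    ∀ (f j : Nat) (seen : PySem.Set String) (cur c : String), j < f →
      fwd t F j cur = some c → forwardTarget F t c = none →
      (∀ i d, i ≤ j → fwd t F i cur = some d → d ∉ seen) →
      aLoop t F f seen cur = c := by
  intro f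
  induction f with
  | zero => intro j seen cur c hj; omega
  | succ f ih =>
    intro j seen cur c hj hfwd hterm hfresh
    rw [aLoop_step]
    have hcur : cur ∉ seen := hfresh 0 cur (by omega) rfl
    simp only [hcur, if_false]
    cases hft : forwardTarget F t cur with
    | none =>
      cases j with
      | zero => simpa [fwd] using hfwd
      | succ j' => rw [show fwd t F (j'+1) cur = none by simp [fwd, hft]] at hfwd; cases hfwd
    | some nxt =>
      cases j with
      | zero =>
        simp only [fwd, Option.some.injEq] at hfwd
        subst hfwd
        rw [hft] at hterm; cases hterm
      | succ j' =>
        have hfwd' : fwd t F j' nxt = some c := by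
          simpa [fwd, hft] using hfwd
        refine ih j' (PySem.Set.add seen cur) nxt c (by omega) hfwd' hterm ?_
        intro i d hi hf
        have horig : fwd t F (i+1) cur = some d := by simp [fwd, hft, hf]
        have hnotseen : d ∉ seen := hfresh (i+1) d (by omega) horig
        have hne : d ≠ cur := by
          intro heq
          have := fwd_distinct t F hfwd hterm (show 0 < i + 1 by omega) (by omega)
          rw [heq] at horig
          exact this horig.symm
        rw [PySem.Set.mem_add]
        rintro (hs | hq)
        · exact hnotseen hs
        · exact hne hq

-- A returns "9999" when no terminal occurs within f hops
theorem aLoop_cycle (t : Int) (F : List (String × List (Int × Int × String))) :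
    ∀ (f : Nat) (seen : PySem.Set String) (cur : String),
      (∀ j c, j < f → fwd t F j cur = some c → forwardTarget F t c ≠ none) →
      aLoop t F f seen cur = "9999" := by
  intro f
  induction f with
  | zero => intro seen cur _; rfl
  | succ f ih =>
    intro seen cur hno
    rw [aLoop_step]
    by_cases hseen : cur ∈ seen
    · simp [hseen]
    · simp only [hseen, if_false]
      cases hft : forwardTarget F t cur with
      | none => exact absurd hft (hno 0 cur (by omega) rfl)
      | some nxt =>
        exact ih (PySem.Set.add seen cur) nxt
          (fun j c hj hf => hno (j+1) c (by omega) (by simp [fwd, hft, hf]))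

-- ===== VERDICT (by name: the statement is the Claim_ definition above) =====
theorem resolve_call_spec : Claim_equal_resolve_call := by
  intro start_ext t F _
  unfold Spec_resolve_call resolve_call resolve_call_alt
  by_cases h : ∃ j c, j < F.length + 1 ∧ fwd t F j start_ext = some c ∧ forwardTarget F t c = none
  · obtain ⟨j, c, hj, hfwd, hterm⟩ := h
    rw [aLoop_term t F (F.length + 2) j PySem.Set.empty start_ext c (by omega) hfwd hterm
        (fun i d _ _ => by simp [PySem.Set.empty]),
      bLoop_term t F (F.length + 1) j start_ext c hj hfwd hterm]
  · push Not at h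
    have hno : ∀ j c, j < F.length + 2 → fwd t F j start_ext = some c → forwardTarget F t c ≠ none := by
      intro j c hj hfwd hterm
      rcases Nat.lt_or_ge j (F.length + 1) with hlt | hge
      · exact h j c hlt hfwd hterm
      · have : j = F.length + 1 := by omega
        subst this
        exact no_term_at_bound t F hfwd hterm
    rw [aLoop_cycle t F (F.length + 2) PySem.Set.empty start_ext hno,
      bLoop_cycle t F (F.length + 1) start_ext
        (fun j c hj hf => hno j c (by omega) hf)]
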